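-- pv_equiv track=rewrite | github.com/Gregseller/tare-foundation | tare/memory/chunking.py | chunk_by_time
-- ===== SOURCE A (Python) =====
-- def chunk_by_time(ticks: list[dict], time_window_us: int) -> list[list[dict]]:
--     """
--     Split tick stream into chunks based on time windows.
--
--     Groups consecutive ticks where time delta doesn't exceed time_window_us.
--     Each chunk starts a new window when the time gap exceeds the threshold.
--
--     Args:
--         ticks: List of tick dictionaries with 't' field (timestamp in microseconds)
--         time_window_us: Maximum time span per chunk in microseconds (positive integer)
--
--     Returns:
--         List of chunks grouped by time windows.
--         Empty input returns empty list.
--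
--     Raises:
--         ValueError: If time_window_us is not a positive integer
--         KeyError: If any tick lacks 't' field
--
--     Example:
--         >>> ticks = [{'t': 0, 'p': 100}, {'t': 500, 'p': 101}]
--         >>> Chunking.chunk_by_time(ticks, 1000)
--         [[{'t': 0, 'p': 100}, {'t': 500, 'p': 101}]]
--     """
--     if not isinstance(time_window_us, int) or time_window_us <= 0:
--         raise ValueError("time_window_us must be a positive integer")
--
--     if not ticks:
--         return []
--
--     chunks = []
--     current_chunk = []
--     window_start_time = None
--
--     for tick in ticks:
--         if "t" not in tick:
--             raise KeyError(f"Tick missing 't' field: {tick}")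
--
--         tick_time = tick["t"]
--
--         # Validate tick_time is integer
--         if not isinstance(tick_time, int):
--             raise ValueError(
--                 f"Tick timestamp must be integer, got {type(tick_time).__name__}"
--             )
--
--         # Initialize window on first tick
--         if window_start_time is None:
--             window_start_time = tick_time
--             current_chunk.append(tick)
--         else:
--             # Check if tick exceeds time window
--             time_delta = tick_time - window_start_time
--             if time_delta <= time_window_us:
--                 current_chunk.append(tick)
--             else:
--                 # Start new chunk
--                 chunks.append(current_chunk)
--                 current_chunk = [tick]
--                 window_start_time = tick_time
--
--     # Append final chunk if non-empty
--     if current_chunk: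
--         chunks.append(current_chunk)
--
--     return chunks
-- ===== SOURCE B (Python) =====
-- def chunk_by_time(ticks: list[dict], time_window_us: int) -> list[list[dict]]:
--     if not isinstance(time_window_us, int) or time_window_us <= 0:
--         raise ValueError("time_window_us must be a positive integer")
--     if not ticks:
--         return []
--     # Validation pass, raising on the first offending tick (same order as A's lazy checks)
--     for tick in ticks:
--         if "t" not in tick:
--             raise KeyError(f"Tick missing 't' field: {tick}")
--         if not isinstance(tick["t"], int):
--             raise ValueError(
--                 f"Tick timestamp must be integer, got {type(tick['t']).__name__}"
--             )
--     # Boundary pass: indices where a new chunk starts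
--     bounds = []
--     window_start = ticks[0]["t"]
--     for i in range(1, len(ticks)):
--         t = ticks[i]["t"]
--         if t - window_start > time_window_us:
--             bounds.append(i)
--             window_start = t
--     # Slice between consecutive boundaries
--     starts = [0] + bounds
--     ends = bounds + [len(ticks)]
--     return [ticks[a:b] for a, b in zip(starts, ends)]
-- ===== Notes on version B (the rewrite author's own statement) =====
-- stated objective: alternative
-- what changed: B replaces A's single accumulate-into-current-chunk loop with a validation pass, a boundary-index scan, and a final slicing of the original list between consecutive boundaries.
import Mathlib
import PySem

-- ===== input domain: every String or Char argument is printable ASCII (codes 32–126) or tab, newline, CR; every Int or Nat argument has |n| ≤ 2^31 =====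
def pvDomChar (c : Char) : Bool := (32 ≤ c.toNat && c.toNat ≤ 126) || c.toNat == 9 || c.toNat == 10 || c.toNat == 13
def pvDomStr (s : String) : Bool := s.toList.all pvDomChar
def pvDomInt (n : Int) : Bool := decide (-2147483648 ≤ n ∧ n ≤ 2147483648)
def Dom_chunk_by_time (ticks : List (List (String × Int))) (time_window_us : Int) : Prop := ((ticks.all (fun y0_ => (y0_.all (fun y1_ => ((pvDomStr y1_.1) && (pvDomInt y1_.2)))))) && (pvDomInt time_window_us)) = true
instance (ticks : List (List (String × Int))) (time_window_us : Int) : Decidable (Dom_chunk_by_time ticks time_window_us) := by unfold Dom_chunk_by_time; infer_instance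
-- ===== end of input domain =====

-- B replaces A's single accumulate-into-current-chunk loop by a validation pass, a
-- boundary-index scan, and slicing the input between consecutive boundaries (objective: alternative).

-- ===== PORT A =====
-- tick["t"] / '"t" in tick': first-match lookup in the association list (Python dict semantics)
def pvTickT (t : List (String × Int)) : Option Int := PySem.Dict.get? (PySem.Dict.mk t) "t"

-- A's loop: state (chunks, current_chunk, window_start); window_start is the timestamp
-- of the first tick of the current chunk (never None after the first tick).
def chunkGoA (w ws : Int) (cur : List (List (String × Int)))
    (chunks : List (List (List (String × Int)))) :
    List (List (String × Int)) → List (List (List (String × Int)))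
  | [] => chunks ++ [cur]          -- current_chunk is nonempty here, so always appended
  | t :: rest =>
    match pvTickT t with
    | none => chunks               -- Python raises KeyError here (excluded by Pre_)
    | some tt =>
      if tt - ws ≤ w then chunkGoA w ws (cur ++ [t]) chunks rest
      else chunkGoA w tt [t] (chunks ++ [cur]) rest

def chunk_by_time (ticks : List (List (String × Int))) (time_window_us : Int) :
    List (List (List (String × Int))) :=
  if time_window_us ≤ 0 then []    -- Python raises ValueError (excluded by Pre_)
  else
    match ticks with
    | [] => []
    | t :: rest =>
      match pvTickT t with
      | none => []                 -- Python raises KeyError (excluded by Pre_)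
      | some tt => chunkGoA time_window_us tt [t] [] rest

-- ===== PORT B =====
-- Source B's validation pass ("t" in every tick); on failure Python raises (excluded by Pre_).
def chunkAllHaveT (ticks : List (List (String × Int))) : Bool :=
  ticks.all (fun t => (pvTickT t).isSome)

-- Source B's boundary loop: indices i (into the full list) where a new chunk starts.
def chunkGoB (w ws : Int) (i : Nat) : List (List (String × Int)) → List Nat
  | [] => []
  | t :: rest =>
    let tt := (pvTickT t).getD 0
    if w < tt - ws then i :: chunkGoB w tt (i + 1) rest
    else chunkGoB w ws (i + 1) rest

-- Source B's final comprehension [ticks[a:b] for a,b in zip([0]+bounds, bounds+[len])],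
-- written as a recursion on the boundary list; ticks[a:b] = (drop a).take (b-a),
-- exact here since 0 ≤ a ≤ b ≤ len ticks for these indices.
def chunkCut (xs : List (List (String × Int))) : Nat → List Nat → List (List (List (String × Int)))
  | p, [] => [xs.drop p]
  | p, b :: bs => (xs.drop p).take (b - p) :: chunkCut xs b bs

def chunk_by_time_alt (ticks : List (List (String × Int))) (time_window_us : Int) :
    List (List (List (String × Int))) :=
  if time_window_us ≤ 0 then []    -- Python raises ValueError (excluded by Pre_)
  else
    match ticks with
    | [] => []
    | t0 :: rest =>
      if chunkAllHaveT (t0 :: rest) then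
        chunkCut (t0 :: rest) 0
          (chunkGoB time_window_us ((pvTickT t0).getD 0) 1 rest)
      else []                      -- Python raises KeyError (excluded by Pre_)

-- ===== PRECONDITION & SPEC =====
-- Pre_: exactly where Python A returns normally: positive window and every tick has a "t" key.
def Pre_chunk_by_time (ticks : List (List (String × Int))) (time_window_us : Int) : Prop :=
  0 < time_window_us ∧ ∀ t ∈ ticks, (pvTickT t).isSome
instance (ticks : List (List (String × Int))) (time_window_us : Int) : Decidable (Pre_chunk_by_time ticks time_window_us) := by unfold Pre_chunk_by_time; infer_instance

def pvWitness_chunk_by_time : (List (List (String × Int))) × Int :=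
  ([[("t", 0), ("p", 100)], [("t", 500)], [("t", 5000)]], 1000)

def Spec_chunk_by_time (ticks : List (List (String × Int))) (time_window_us : Int) (out : List (List (List (String × Int)))) : Prop := out = chunk_by_time_alt ticks time_window_us
instance (ticks : List (List (String × Int))) (time_window_us : Int) (out : List (List (List (String × Int)))) : Decidable (Spec_chunk_by_time ticks time_window_us out) := by unfold Spec_chunk_by_time; infer_instance

-- ===== CLAIM (what is proved, stated in full; the proofs are below) =====
def Claim_equal_chunk_by_time : Prop := ∀ (ticks : List (List (String × Int))) (time_window_us : Int), Dom_chunk_by_time ticks time_window_us → Pre_chunk_by_time ticks time_window_us → Spec_chunk_by_time ticks time_window_us (chunk_by_time ticks time_window_us)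

-- ===== LEMMAS AND PROOFS =====

-- Common reference shape both ports are reduced to: chunks of `rest` with an open chunk `cur`
-- whose window started at timestamp `ws` (timestamps read with getD 0; under Pre_ the key exists).
def chunkMerge (w ws : Int) (cur : List (List (String × Int))) :
    List (List (String × Int)) → List (List (List (String × Int)))
  | [] => [cur]
  | t :: rest =>
    let tt := (pvTickT t).getD 0
    if tt - ws ≤ w then chunkMerge w ws (cur ++ [t]) rest
    else cur :: chunkMerge w tt [t] rest

lemma chunkGoA_eq (w : Int) :
    ∀ (rest : List (List (String × Int))), (∀ t ∈ rest, (pvTickT t).isSome) →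
    ∀ ws cur chunks, chunkGoA w ws cur chunks rest = chunks ++ chunkMerge w ws cur rest := by
  intro rest
  induction rest with
  | nil => intro _ ws cur chunks; simp [chunkGoA, chunkMerge]
  | cons t rest ih =>
    intro h ws cur chunks
    obtain ⟨tt, htt⟩ := Option.isSome_iff_exists.mp (h t (by simp))
    have hrest : ∀ t ∈ rest, (pvTickT t).isSome := fun x hx => h x (by simp [hx])
    simp only [chunkGoA, chunkMerge, htt, Option.getD_some]
    split
    · exact ih hrest ws (cur ++ [t]) chunks
    · rw [ih hrest tt [t] (chunks ++ [cur])]; simp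

lemma chunkGoB_shift (w : Int) :
    ∀ (rest : List (List (String × Int))) (ws : Int) (j i : Nat),
      chunkGoB w ws (j + i) rest = (chunkGoB w ws j rest).map (· + i) := by
  intro rest
  induction rest with
  | nil => intro ws j i; simp [chunkGoB]
  | cons t rest ih =>
    intro ws j i
    simp only [chunkGoB]
    split
    · simp only [List.map_cons]
      rw [show j + i + 1 = (j + 1) + i by omega, ih]
    · rw [show j + i + 1 = (j + 1) + i by omega, ih]

lemma chunkCut_shift (pre ys : List (List (String × Int))) :
    ∀ (bs : List Nat) (p : Nat),
      chunkCut (pre ++ ys) (p + pre.length) (bs.map (· + pre.length)) = chunkCut ys p bs := by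
  intro bs
  induction bs with
  | nil =>
    intro p
    simp only [chunkCut, List.map_nil, List.drop_append]
    rw [List.drop_eq_nil_of_le (by omega), show p + pre.length - pre.length = p by omega]
    simp
  | cons b bs ih =>
    intro p
    simp only [chunkCut, List.map_cons, List.drop_append]
    rw [List.drop_eq_nil_of_le (by omega), show p + pre.length - pre.length = p by omega,
      show b + pre.length - (p + pre.length) = b - p by omega, List.nil_append, ih b]

lemma chunkCut_goB (w : Int) :
    ∀ (rest : List (List (String × Int))) (ws : Int) (cur : List (List (String × Int))),
      chunkCut (cur ++ rest) 0 (chunkGoB w ws cur.length rest) = chunkMerge w ws cur rest := by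
  intro rest
  induction rest with
  | nil => intro ws cur; simp [chunkGoB, chunkCut, chunkMerge]
  | cons t rest ih =>
    intro ws cur
    simp only [chunkGoB, chunkMerge]
    by_cases h : (pvTickT t).getD 0 - ws ≤ w
    · -- no boundary: t joins the current chunk
      rw [if_neg (by omega), if_pos h]
      have := ih ws (cur ++ [t])
      simpa using this
    · -- boundary at index cur.length: close cur, start a new chunk at t
      rw [if_pos (by omega), if_neg h]
      simp only [chunkCut, List.drop_zero, Nat.sub_zero]
      rw [List.take_left]
      congr 1
      rw [show cur.length + 1 = 1 + cur.length by omega, chunkGoB_shift]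
      have h2 := chunkCut_shift cur (t :: rest) (chunkGoB w ((pvTickT t).getD 0) 1 rest) 0
      simp only [Nat.zero_add] at h2
      rw [h2]
      simpa using ih ((pvTickT t).getD 0) [t]

-- ===== VERDICT (by name: the statement is the Claim_ definition above) =====
theorem chunk_by_time_spec : Claim_equal_chunk_by_time := by
  intro ticks w _ hpre
  obtain ⟨hw, hkeys⟩ := hpre
  unfold Spec_chunk_by_time chunk_by_time chunk_by_time_alt
  simp only [if_neg (show ¬ w ≤ 0 by omega)]
  match ticks with
  | [] => rfl
  | t0 :: rest =>
    have hall : chunkAllHaveT (t0 :: rest) = true := by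
      simp only [chunkAllHaveT, List.all_eq_true]
      exact fun x hx => hkeys x hx
    obtain ⟨tt, htt⟩ := Option.isSome_iff_exists.mp (hkeys t0 (by simp))
    simp only [hall, if_true, htt, Option.getD_some]
    rw [chunkGoA_eq w rest (fun x hx => hkeys x (by simp [hx])) tt [t0] []]
    simpa using (chunkCut_goB w rest tt [t0]).symm
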